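-- pv_equiv track=rewrite | github.com/parhamfa/mikrosms | backend/mikrotik/sms_handler.py | decode_gsm7_packed
-- ===== SOURCE A (Python) =====
-- def decode_gsm7_packed(packed_hex: str, num_chars: int = 0) -> str:
--     """Decode GSM 7-bit packed data."""
--     gsm7_alphabet = (
--         "@£$¥èéùìòÇ\nØø\rÅåΔ_ΦΓΛΩΠΨΣΘΞ ÆæßÉ "
--         "!\"#¤%&'()*+,-./0123456789:;<=>?"
--         "¡ABCDEFGHIJKLMNOPQRSTUVWXYZÄÖÑÜ§"
--         "¿abcdefghijklmnopqrstuvwxyzäöñüà"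
--     )
--
--     try:
--         packed = bytes.fromhex(packed_hex)
--     except ValueError:
--         return packed_hex
--
--     chars = []
--     shift = 0
--     prev = 0
--
--     for byte in packed:
--         char = ((byte << shift) | prev) & 0x7F
--         if char < len(gsm7_alphabet):
--             chars.append(gsm7_alphabet[char])
--         else:
--             chars.append(chr(char))
--
--         prev = byte >> (7 - shift)
--         shift += 1
--
--         if shift == 7:
--             if prev < len(gsm7_alphabet):
--                 chars.append(gsm7_alphabet[prev & 0x7F])
--             shift = 0
--             prev = 0
--
--     if num_chars > 0:
--         return "".join(chars[:num_chars])
--     return "".join(chars)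
-- ===== SOURCE B (Python) =====
-- def decode_gsm7_packed(packed_hex: str, num_chars: int = 0) -> str:
--     """Decode GSM 7-bit packed data via a running bit accumulator."""
--     gsm7_alphabet = (
--         "@£$¥èéùìòÇ\nØø\rÅåΔ_ΦΓΛΩΠΨΣΘΞ ÆæßÉ "
--         "!\"#¤%&'()*+,-./0123456789:;<=>?"
--         "¡ABCDEFGHIJKLMNOPQRSTUVWXYZÄÖÑÜ§"
--         "¿abcdefghijklmnopqrstuvwxyzäöñüà"
--     )
--
--     try:
--         packed = bytes.fromhex(packed_hex)
--     except ValueError: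
--         return packed_hex
--
--     chars = []
--     buffer = 0
--     bits = 0
--     for byte in packed:
--         buffer |= byte << bits
--         bits += 8
--         while bits >= 7:
--             chars.append(gsm7_alphabet[buffer & 0x7F])
--             buffer >>= 7
--             bits -= 7
--
--     if num_chars > 0:
--         return "".join(chars[:num_chars])
--     return "".join(chars)
-- ===== Notes on version B (the rewrite author's own statement) =====
-- stated objective: alternative
-- what changed: Replaced A's per-byte shift/prev septet reconstruction (with a special-cased 8th character every 7 bytes) by a running bit accumulator: each byte is or-ed into a buffer and an inner while-loop pops 7-bit groups, so the 8-septets-per-7-bytes cadence falls out of the bit count instead of being hand-coded.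
import Mathlib
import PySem

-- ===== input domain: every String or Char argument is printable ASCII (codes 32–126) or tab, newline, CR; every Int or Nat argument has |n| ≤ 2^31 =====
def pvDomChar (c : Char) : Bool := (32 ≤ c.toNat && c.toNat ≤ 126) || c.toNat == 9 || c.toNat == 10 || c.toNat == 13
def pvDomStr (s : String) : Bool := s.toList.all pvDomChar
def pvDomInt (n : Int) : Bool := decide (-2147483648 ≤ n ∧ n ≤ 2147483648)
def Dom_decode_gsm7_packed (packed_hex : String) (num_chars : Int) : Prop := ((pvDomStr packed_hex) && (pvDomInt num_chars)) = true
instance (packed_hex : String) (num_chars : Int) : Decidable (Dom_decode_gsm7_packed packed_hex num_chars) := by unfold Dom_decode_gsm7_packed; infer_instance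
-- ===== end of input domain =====

-- B replaces A's per-byte shift/prev septet extraction by a running bit accumulator
-- (buffer/bits with an inner while-loop popping 7-bit groups); objective: alternative
-- decomposition of the same O(n) decode.

-- ===== PORT A =====
-- shared port of Python's bytes.fromhex (both A and B call it): skip ASCII whitespace
-- between byte pairs, two adjacent hex digits per byte, ValueError -> none (exact on Dom).
def pvHexVal? (c : Char) : Option Nat :=
  if 48 ≤ c.toNat ∧ c.toNat ≤ 57 then some (c.toNat - 48)
  else if 97 ≤ c.toNat ∧ c.toNat ≤ 102 then some (c.toNat - 87)
  else if 65 ≤ c.toNat ∧ c.toNat ≤ 70 then some (c.toNat - 55)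
  else none

def pvIsWs (c : Char) : Bool :=
  c.toNat == 32 || c.toNat == 9 || c.toNat == 10 || c.toNat == 11 || c.toNat == 12 || c.toNat == 13

def pvFromhex? : List Char → Option (List Nat)
  | [] => some []
  | [c] => if pvIsWs c then some [] else none
  | c :: c2 :: rest =>
    if pvIsWs c then pvFromhex? (c2 :: rest)
    else
      match pvHexVal? c, pvHexVal? c2 with
      | some d1, some d2 => (pvFromhex? rest).map (fun bs => (16 * d1 + d2) :: bs)
      | _, _ => none

-- the GSM 7-bit default alphabet (the same 128-character constant both Pythons embed)
def pvGsm7 : List Char :=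
  "@£$¥èéùìòÇ\nØø\rÅåΔ_ΦΓΛΩΠΨΣΘΞ ÆæßÉ !\"#¤%&'()*+,-./0123456789:;<=>?¡ABCDEFGHIJKLMNOPQRSTUVWXYZÄÖÑÜ§¿abcdefghijklmnopqrstuvwxyzäöñüà".toList

-- A's for-loop: state (shift, prev), one septet per byte plus an extra one every 7th byte
def pvLoopA : List Nat → Nat → Nat → List Char → List Char
  | [], _, _, acc => acc.reverse
  | byte :: rest, shift, prev, acc =>
    let ch := ((byte <<< shift) ||| prev) &&& 127
    let acc1 := (if ch < pvGsm7.length then pvGsm7.getD ch ' ' else Char.ofNat ch) :: acc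
    let prev1 := byte >>> (7 - shift)
    let shift1 := shift + 1
    if shift1 = 7 then
      let acc2 := if prev1 < pvGsm7.length then pvGsm7.getD (prev1 &&& 127) ' ' :: acc1 else acc1
      pvLoopA rest 0 0 acc2
    else
      pvLoopA rest shift1 prev1 acc1

def decode_gsm7_packed (packed_hex : String) (num_chars : Int) : String :=
  match pvFromhex? packed_hex.toList with
  | none => packed_hex
  | some packed =>
    let chars := pvLoopA packed 0 0 []
    if num_chars > 0 then String.ofList (chars.take num_chars.toNat) else String.ofList chars

-- ===== PORT B =====
-- B's inner while-loop: pop septets while at least 7 bits are buffered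
def pvPopB : Nat → Nat → List Char → Nat × Nat × List Char
  | buffer, bits, acc =>
    if 7 ≤ bits then
      pvPopB (buffer >>> 7) (bits - 7) (pvGsm7.getD (buffer &&& 127) ' ' :: acc)
    else (buffer, bits, acc)
  termination_by _ bits _ => bits
  decreasing_by omega

-- B's for-loop: shift each byte into the accumulator, then drain septets
def pvLoopB : List Nat → Nat → Nat → List Char → List Char
  | [], _, _, acc => acc.reverse
  | byte :: rest, buffer, bits, acc =>
    let r := pvPopB (buffer ||| (byte <<< bits)) (bits + 8) acc
    pvLoopB rest r.1 r.2.1 r.2.2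

def decode_gsm7_packed_alt (packed_hex : String) (num_chars : Int) : String :=
  match pvFromhex? packed_hex.toList with
  | none => packed_hex
  | some packed =>
    let chars := pvLoopB packed 0 0 []
    if num_chars > 0 then String.ofList (chars.take num_chars.toNat) else String.ofList chars

-- ===== PRECONDITION & SPEC =====
def Spec_decode_gsm7_packed (packed_hex : String) (num_chars : Int) (out : String) : Prop := out = decode_gsm7_packed_alt packed_hex num_chars
instance (packed_hex : String) (num_chars : Int) (out : String) : Decidable (Spec_decode_gsm7_packed packed_hex num_chars out) := by unfold Spec_decode_gsm7_packed; infer_instance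

-- ===== CLAIM (what is proved, stated in full; the proofs are below) =====
def Claim_equal_decode_gsm7_packed : Prop := ∀ (packed_hex : String) (num_chars : Int), Dom_decode_gsm7_packed packed_hex num_chars → Spec_decode_gsm7_packed packed_hex num_chars (decode_gsm7_packed packed_hex num_chars)

-- ===== LEMMAS AND PROOFS =====

set_option maxRecDepth 4000 in
theorem pvGsm7_length : pvGsm7.length = 128 := by decide

-- disjoint-or is addition: p ||| (b <<< s) = p + b * 2 ^ s when p < 2 ^ s
theorem pvLorAdd : ∀ (s p b : Nat), p < 2 ^ s → p ||| (b <<< s) = p + b * 2 ^ s := by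
  intro s
  induction s with
  | zero => intro p b hp; interval_cases p; simp [Nat.shiftLeft_eq]
  | succ s ih =>
    intro p b hp
    have hdecomp : p = Nat.bit (Nat.bodd p) (Nat.div2 p) := (Nat.bit_bodd_div2 p).symm
    have h2 : b <<< (s+1) = Nat.bit false (b <<< s) := by
      simp [Nat.bit, Nat.shiftLeft_eq, pow_succ]; ring
    have hpow : 2 ^ (s+1) = 2 * 2 ^ s := by rw [pow_succ]; ring
    have hbp : b * 2 ^ (s+1) = 2 * (b * 2 ^ s) := by rw [hpow]; ring
    have hd2 : Nat.div2 p < 2 ^ s := by rw [Nat.div2_val]; omega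
    have hmod := Nat.mod_two_of_bodd p
    conv_lhs => rw [hdecomp, h2]
    rw [Nat.lor_bit, ih (Nat.div2 p) b hd2]
    simp only [Nat.bit, Nat.div2_val, Bool.or_false]
    rcases hb : Nat.bodd p <;> simp only [hb, cond, Bool.toNat_false, Bool.toNat_true] at hmod ⊢
    all_goals omega

theorem pvAnd127 (n : Nat) : n &&& 127 = n % 128 := by
  have := Nat.and_two_pow_sub_one_eq_mod n 7
  norm_num at this; exact this

theorem pvShr (n k : Nat) : n >>> k = n / 2 ^ k := Nat.shiftRight_eq_div_pow n k

theorem pvHexVal?_lt {c : Char} {d : Nat} (h : pvHexVal? c = some d) : d < 16 := by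
  unfold pvHexVal? at h
  split_ifs at h with h1 h2 h3 <;> simp only [Option.some.injEq] at h <;> omega

theorem pvFromhex?_lt : ∀ (l : List Char) (bs : List Nat), pvFromhex? l = some bs → ∀ b ∈ bs, b < 256 := by
  intro l
  induction l using pvFromhex?.induct with
  | case1 => intro bs h b hb; simp only [pvFromhex?, Option.some.injEq] at h; subst h; simp at hb
  | case2 c hws => intro bs h b hb; simp only [pvFromhex?, hws, if_true, Option.some.injEq] at h; subst h; simp at hb
  | case3 c hws => intro bs h b hb; simp [pvFromhex?, hws] at h
  | case4 c c2 rest hws ih => intro bs h b hb; simp only [pvFromhex?, hws, if_true] at h; exact ih bs h b hb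
  | case5 c c2 rest hws d1 d2 h2 h1 ih =>
    intro bs h b hb
    simp only [pvFromhex?, hws, Bool.false_eq_true, if_false] at h
    rw [h1, h2] at h
    simp only [Option.map_eq_some_iff] at h
    obtain ⟨bs', hbs', rfl⟩ := h
    rcases List.mem_cons.mp hb with rfl | hmem
    · have := pvHexVal?_lt h1; have := pvHexVal?_lt h2; omega
    · exact ih bs' hbs' b hmem
  | case6 c c2 rest hws hno =>
    intro bs h b hb
    simp only [pvFromhex?, hws, Bool.false_eq_true, if_false] at h
    rcases hc : pvHexVal? c with _ | d1 <;> rcases hc2 : pvHexVal? c2 with _ | d2 <;>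
      simp only [reduceCtorEq] at h

-- B's leftover accumulator (buffer, bits) is exactly A's (prev, shift) state
set_option maxRecDepth 10000 in
theorem pvLoop_eq : ∀ (bytes : List Nat) (s p : Nat) (acc : List Char),
    (∀ b ∈ bytes, b < 256) → s < 7 → p < 2 ^ s →
    pvLoopA bytes s p acc = pvLoopB bytes p s acc := by
  have hm : ∀ n : Nat, n % 128 < 128 := fun n => Nat.mod_lt _ (by norm_num)
  intro bytes
  induction bytes with
  | nil => intro s p acc _ _ _; rfl
  | cons byte rest ih =>
    intro s p acc hb hs hp
    have hbyte : byte < 256 := hb byte (by simp)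
    have hrest : ∀ b ∈ rest, b < 256 := fun b h => hb b (by simp [h])
    have hlor : p ||| (byte <<< s) = p + byte * 2 ^ s := pvLorAdd s p byte hp
    have hlor2 : byte <<< s ||| p = p + byte * 2 ^ s := by rw [Nat.lor_comm]; exact hlor
    simp only [pvLoopA, pvLoopB, pvGsm7_length]
    rw [pvPopB]
    simp only [hlor, hlor2, pvAnd127, pvShr]
    interval_cases s
    · -- s = 0
      obtain rfl : p = 0 := by omega
      norm_num [hm]
      rw [pvPopB]
      norm_num [pvAnd127, pvShr, hm]
      exact ih 1 (byte / 128) _ hrest (by omega) (by omega)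
    · -- s = 1
      norm_num [hm]
      rw [pvPopB]
      norm_num [pvAnd127, pvShr, hm]
      rw [show (p + byte * 2) / 128 = byte / 64 from by omega]
      exact ih 2 (byte / 64) _ hrest (by omega) (by omega)
    · -- s = 2
      norm_num [hm]
      rw [pvPopB]
      norm_num [pvAnd127, pvShr, hm]
      rw [show (p + byte * 4) / 128 = byte / 32 from by omega]
      exact ih 3 (byte / 32) _ hrest (by omega) (by omega)
    · -- s = 3
      norm_num [hm]
      rw [pvPopB]
      norm_num [pvAnd127, pvShr, hm]
      rw [show (p + byte * 8) / 128 = byte / 16 from by omega]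
      exact ih 4 (byte / 16) _ hrest (by omega) (by omega)
    · -- s = 4
      norm_num [hm]
      rw [pvPopB]
      norm_num [pvAnd127, pvShr, hm]
      rw [show (p + byte * 16) / 128 = byte / 8 from by omega]
      exact ih 5 (byte / 8) _ hrest (by omega) (by omega)
    · -- s = 5
      norm_num [hm]
      rw [pvPopB]
      norm_num [pvAnd127, pvShr, hm]
      rw [show (p + byte * 32) / 128 = byte / 4 from by omega]
      exact ih 6 (byte / 4) _ hrest (by omega) (by omega)
    · -- s = 6
      have hg : byte / 2 < 128 := by omega
      norm_num [hm, hg]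
      rw [pvPopB]
      norm_num [pvAnd127, pvShr, hm]
      rw [pvPopB]
      norm_num [pvAnd127, pvShr, hm]
      rw [show (p + byte * 64) / 128 = byte / 2 from by omega]
      rw [show byte / 2 % 128 = byte / 2 from by omega]
      rw [show byte / 2 / 128 = 0 from by omega]
      exact ih 0 0 _ hrest (by omega) (by omega)

-- ===== VERDICT (by name: the statement is the Claim_ definition above) =====
theorem decode_gsm7_packed_spec : Claim_equal_decode_gsm7_packed := by
  intro packed_hex num_chars _
  unfold Spec_decode_gsm7_packed decode_gsm7_packed decode_gsm7_packed_alt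
  cases h : pvFromhex? packed_hex.toList with
  | none => rfl
  | some packed =>
    have := pvLoop_eq packed 0 0 [] (pvFromhex?_lt _ _ h) (by omega) (by omega)
    simp [this]
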